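-- pv_equiv track=rewrite | github.com/unknownpgr/compiler | PDA.py | terminating_rule
-- ===== SOURCE A (Python) =====
-- def terminating_rule(P):
--     # Terminating ruels.
--     terminating = []
--
--     while True:
--         ntlen = len(terminating)
--         for rule in P:
--             if rule[0] in terminating:
--                 continue
--
--             for symbol in rule[1]:
--                 # If given rule is both nonterminal and have some nonterminating symbol
--                 if symbol[0] == '#' and symbol not in terminating:
--                     break
--             else:
--                 # If every symbol in string is terminating nonterminal or termial
--                 terminating.append(rule[0])
--
--         # Check if terminating symbol is changed
--         if ntlen == len(terminating):
--             break
--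
--     # Check if given rule has nonterminating symbol
--     def check_terminating(rule):
--         if rule[0] not in terminating:
--             return False
--         for symbol in rule[1]:
--             if symbol[0] == '#' and symbol not in terminating:
--                 return False
--         return True
--
--     # Return terminating rule
--     return list(filter(check_terminating, P))
-- ===== SOURCE B (Python) =====
-- def terminating_rule(P):
--     # Worklist propagation: index rules by the nonterminal symbols they wait on,
--     # then push each newly-terminating lhs once and re-check only the rules that
--     # mention it, instead of re-scanning the whole grammar until a fixpoint.
--     index = {}
--     for lhs, rhs in P:
--         for s in rhs:
--             if s[0] == '#':
--                 index.setdefault(s, []).append((lhs, rhs))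
--
--     term = set()
--     queue = []
--     for lhs, rhs in P:
--         if lhs not in term and all(s[0] != '#' for s in rhs):
--             term.add(lhs)
--             queue.append(lhs)
--
--     while queue:
--         sym = queue.pop()
--         for lhs, rhs in index.get(sym, []):
--             if lhs not in term and all(s[0] != '#' or s in term for s in rhs):
--                 term.add(lhs)
--                 queue.append(lhs)
--
--     return [r for r in P
--             if r[0] in term and all(s[0] != '#' or s in term for s in r[1])]
-- ===== Notes on version B (the rewrite author's own statement) =====
-- stated objective: alternative
-- what changed: A rescans the whole rule list in repeated passes (with list membership) until a fixpoint; B builds a per-symbol index of the rules that wait on each nonterminal and propagates newly-terminating nonterminals through a worklist with a hash set, re-checking a rule only when a symbol it mentions becomes terminating.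
-- outside the precondition, e.g. on terminating_rule([('#A', ['#B', ''])]): A returns [], B raises IndexError
import Mathlib
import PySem

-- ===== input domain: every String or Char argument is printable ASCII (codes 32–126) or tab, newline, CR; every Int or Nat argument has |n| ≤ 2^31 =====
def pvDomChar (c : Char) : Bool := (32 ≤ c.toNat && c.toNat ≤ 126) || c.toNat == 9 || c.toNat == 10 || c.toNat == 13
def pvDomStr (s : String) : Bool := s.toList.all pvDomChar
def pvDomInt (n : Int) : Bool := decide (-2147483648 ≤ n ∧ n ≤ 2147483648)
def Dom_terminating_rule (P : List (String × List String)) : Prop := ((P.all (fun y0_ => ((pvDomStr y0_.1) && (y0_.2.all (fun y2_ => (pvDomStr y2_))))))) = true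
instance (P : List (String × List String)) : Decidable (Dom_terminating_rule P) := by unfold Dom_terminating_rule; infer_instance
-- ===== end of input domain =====

-- B replaces A's repeated full-grammar passes by a worklist: rules are indexed by the
-- nonterminal symbols they wait on and each newly-terminating lhs is propagated once
-- (objective: alternative algorithm; equivalence is about the return value, neither program mutates P).

-- shared helper: Python's  symbol[0] == '#'  (both programs test symbols this way)
def isNT (s : String) : Bool := PySem.Str.pyGet? s 0 == some '#'

-- ===== PORT A =====
-- one rule of the inner 'for rule in P' body (for-else over rule[1] rendered as List.any)
def pvStepA (T : List String) (r : String × List String) : List String :=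
  if T.contains r.1 then T
  else if r.2.any (fun s => isNT s && !(T.contains s)) then T
  else T ++ [r.1]

-- one full pass of the 'while True' body over P
def pvPassA (P : List (String × List String)) (T : List String) : List String :=
  P.foldl pvStepA T

-- the 'while True' loop: run a pass, stop when len(terminating) did not change.
-- Fuel P.length+1 is sufficient: each continuing pass strictly grows the nodup list
-- 'terminating' ⊆ lhs's of P (proved in pvLoopA_stable below).
def pvLoopA (P : List (String × List String)) : Nat → List String → List String
  | 0, T => T
  | f+1, T =>
    let T' := pvPassA P T
    if T.length = T'.length then T' else pvLoopA P f T'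

-- check_terminating
def pvCheckA (T : List String) (r : String × List String) : Bool :=
  T.contains r.1 && !(r.2.any (fun s => isNT s && !(T.contains s)))

def terminating_rule (P : List (String × List String)) : List (String × List String) :=
  P.filter (pvCheckA (pvLoopA P (P.length + 1) []))

-- ===== PORT B =====
-- index.setdefault(s, []).append((lhs, rhs)) for every nonterminal occurrence
def pvIndexB (P : List (String × List String)) :
    PySem.Dict String (List (String × List String)) :=
  P.foldl
    (fun d r => r.2.foldl
      (fun d s => if isNT s then d.insert s (d.getD s [] ++ [r]) else d) d)
    PySem.Dict.empty

-- seed pass: rules with no nonterminal on the right. The Python stack (append/pop at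
-- the list's end) is represented with its top at the head: push = cons, pop = head.
def pvInitB (P : List (String × List String)) : PySem.Set String × List String :=
  P.foldl
    (fun tq r =>
      if !(PySem.Set.contains tq.1 r.1) && !(r.2.any isNT)
      then (PySem.Set.add tq.1 r.1, r.1 :: tq.2) else tq)
    (PySem.Set.empty, [])

-- body of 'for lhs, rhs in index.get(sym, [])'
def pvStepB (tq : PySem.Set String × List String) (r : String × List String) :
    PySem.Set String × List String :=
  if !(PySem.Set.contains tq.1 r.1)
     && !(r.2.any (fun s => isNT s && !(PySem.Set.contains tq.1 s)))
  then (PySem.Set.add tq.1 r.1, r.1 :: tq.2) else tq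

-- 'while queue' loop. Fuel P.length+1 is sufficient: the measure
-- |queue| + #(distinct lhs not yet in term) starts ≤ P.length and drops by 1 per pop
-- (proved in pvLoopB_run below), so the queue is empty whenever fuel runs out.
def pvLoopB (idx : PySem.Dict String (List (String × List String))) :
    Nat → PySem.Set String × List String → PySem.Set String
  | 0, tq => tq.1
  | f+1, (term, q) =>
    match q with
    | [] => term
    | sym :: rest => pvLoopB idx f ((idx.getD sym []).foldl pvStepB (term, rest))

-- the final comprehension's condition
def pvCheckB (term : PySem.Set String) (r : String × List String) : Bool :=
  PySem.Set.contains term r.1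
    && !(r.2.any (fun s => isNT s && !(PySem.Set.contains term s)))

def terminating_rule_alt (P : List (String × List String)) : List (String × List String) :=
  P.filter (pvCheckB (pvLoopB (pvIndexB P) (P.length + 1) (pvInitB P)))

-- ===== PRECONDITION & SPEC =====
-- Pre_ excludes inputs with an empty-string symbol on some right-hand side: Python A
-- raises IndexError on symbol[0] for most of them, and on the rest only skips the empty
-- symbol through an accidental early 'break'; B raises IndexError on all of them.
def Pre_terminating_rule (P : List (String × List String)) : Prop :=
  ∀ r ∈ P, ∀ s ∈ r.2, s ≠ ""
instance (P : List (String × List String)) : Decidable (Pre_terminating_rule P) := by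
  unfold Pre_terminating_rule; infer_instance

def pvWitness_terminating_rule : (List (String × List String)) :=
  [("#S", ["a", "#T"]), ("#T", ["b"]), ("#U", ["#V"])]

def Spec_terminating_rule (P : List (String × List String)) (out : List (String × List String)) : Prop := out = terminating_rule_alt P
instance (P : List (String × List String)) (out : List (String × List String)) : Decidable (Spec_terminating_rule P out) := by unfold Spec_terminating_rule; infer_instance

-- ===== CLAIM (what is proved, stated in full; the proofs are below) =====
def Claim_equal_terminating_rule : Prop := ∀ (P : List (String × List String)), Dom_terminating_rule P → Pre_terminating_rule P → Spec_terminating_rule P (terminating_rule P)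

-- ===== LEMMAS AND PROOFS =====

-- The common semantics both programs compute: the least set of nonterminals closed
-- under "all nonterminal symbols of some rule for lhs are already terminating".
inductive PvTerm (P : List (String × List String)) : String → Prop
  | intro (lhs : String) (rhs : List String) :
      (lhs, rhs) ∈ P → (∀ s ∈ rhs, isNT s = true → PvTerm P s) → PvTerm P lhs


-- ---------- A-side ----------

-- each step of a pass only appends
theorem pvStepA_append (T : List String) (r : String × List String) :
    ∃ u, pvStepA T r = T ++ u := by
  unfold pvStepA
  split_ifs with h1 h2
  · exact ⟨[], by simp⟩
  · exact ⟨[], by simp⟩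
  · exact ⟨[r.1], rfl⟩

theorem foldl_stepA_append (l : List (String × List String)) (T : List String) :
    ∃ u, l.foldl pvStepA T = T ++ u := by
  induction l generalizing T with
  | nil => exact ⟨[], by simp⟩
  | cons r l ih =>
    obtain ⟨u, hu⟩ := pvStepA_append T r
    obtain ⟨v, hv⟩ := ih (pvStepA T r)
    refine ⟨u ++ v, ?_⟩
    simp only [List.foldl_cons]
    rw [hu] at hv ⊢
    rw [hv, List.append_assoc]

-- every element a pass adds is justified by PvTerm
theorem pvStepA_sound (P : List (String × List String)) (T : List String)
    (r : String × List String) (hr : r ∈ P) (hT : ∀ x ∈ T, PvTerm P x) :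
    ∀ x ∈ pvStepA T r, PvTerm P x := by
  intro x hx
  unfold pvStepA at hx
  split_ifs at hx with h1 h2
  · exact hT x hx
  · exact hT x hx
  · rcases List.mem_append.1 hx with h | h
    · exact hT x h
    · simp only [List.mem_singleton] at h
      subst h
      refine PvTerm.intro r.1 r.2 hr ?_
      intro s hs hnt
      have hc : ¬(isNT s && !(T.contains s)) = true := fun hc =>
        h2 (List.any_eq_true.2 ⟨s, hs, hc⟩)
      simp only [hnt, Bool.true_and, Bool.not_eq_eq_eq_not, Bool.not_true] at hc
      exact hT s (List.contains_iff_mem.1 (by simpa using hc))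

theorem foldl_stepA_sound (P : List (String × List String))
    (l : List (String × List String)) (T : List String)
    (hl : ∀ r ∈ l, r ∈ P) (hT : ∀ x ∈ T, PvTerm P x) :
    ∀ x ∈ l.foldl pvStepA T, PvTerm P x := by
  induction l generalizing T with
  | nil => exact hT
  | cons r l ih =>
    exact ih (pvStepA T r) (fun r' h => hl r' (List.mem_cons_of_mem _ h))
      (pvStepA_sound P T r (hl r (List.mem_cons_self)) hT)

-- nodup list of lhs's, for the fuel bound
def pvGoodA (P : List (String × List String)) (T : List String) : Prop :=
  T.Nodup ∧ ∀ x ∈ T, x ∈ P.map Prod.fst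

theorem pvStepA_good (P : List (String × List String)) (T : List String)
    (r : String × List String) (hr : r ∈ P) (h : pvGoodA P T) :
    pvGoodA P (pvStepA T r) := by
  obtain ⟨hnd, hsub⟩ := h
  unfold pvStepA
  split_ifs with h1 h2
  · exact ⟨hnd, hsub⟩
  · exact ⟨hnd, hsub⟩
  · have hnm : r.1 ∉ T := by
      intro hm
      exact h1 (List.contains_iff_mem.2 hm)
    constructor
    · simp [List.nodup_append, hnd]
      intro a ha hae; exact hnm (hae ▸ ha)
    · intro x hx
      rcases List.mem_append.1 hx with h | h
      · exact hsub x h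
      · simp only [List.mem_singleton] at h
        exact h ▸ List.mem_map_of_mem hr

theorem foldl_stepA_good (P : List (String × List String))
    (l : List (String × List String)) (T : List String)
    (hl : ∀ r ∈ l, r ∈ P) (h : pvGoodA P T) : pvGoodA P (l.foldl pvStepA T) := by
  induction l generalizing T with
  | nil => exact h
  | cons r l ih =>
    exact ih (pvStepA T r) (fun r' h' => hl r' (List.mem_cons_of_mem _ h'))
      (pvStepA_good P T r (hl r (List.mem_cons_self)) h)

theorem pvGoodA_length (P : List (String × List String)) (T : List String)
    (h : pvGoodA P T) : T.length ≤ P.length := by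
  obtain ⟨hnd, hsub⟩ := h
  have h1 : T.toFinset.card = T.length := List.toFinset_card_of_nodup hnd
  have h2 : T.toFinset ⊆ (P.map Prod.fst).toFinset := by
    intro x hx
    exact List.mem_toFinset.2 (hsub x (List.mem_toFinset.1 hx))
  have h3 := Finset.card_le_card h2
  have h4 : (P.map Prod.fst).toFinset.card = (P.map Prod.fst).dedup.length :=
    List.card_toFinset _
  have h5 : (P.map Prod.fst).dedup.length ≤ (P.map Prod.fst).length :=
    List.Sublist.length_le (List.dedup_sublist _)
  simp only [List.length_map] at h5
  omega

-- the loop's result is a fixed point of the pass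
theorem pvLoopA_stable (P : List (String × List String)) :
    ∀ (f : Nat) (T : List String), pvGoodA P T → P.length + 1 ≤ f + T.length →
      pvPassA P (pvLoopA P f T) = pvLoopA P f T := by
  intro f
  induction f with
  | zero =>
    intro T hg hb
    have := pvGoodA_length P T hg
    omega
  | succ f ih =>
    intro T hg hb
    show pvPassA P (pvLoopA P (f+1) T) = _
    rw [pvLoopA]
    split_ifs with hlen
    · obtain ⟨u, hu⟩ := foldl_stepA_append P T
      have hlen' : T.length = (T ++ u).length := hu ▸ hlen
      have hu0 : u = [] := by
        apply List.eq_nil_of_length_eq_zero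
        simp only [List.length_append] at hlen'
        omega
      show pvPassA P (pvPassA P T) = pvPassA P T
      have hfix : pvPassA P T = T := by
        show P.foldl pvStepA T = T
        rw [hu, hu0, List.append_nil]
      rw [hfix]
      exact hfix
    · apply ih
      · exact foldl_stepA_good P P T (fun r h => h) hg
      · obtain ⟨u, hu⟩ := foldl_stepA_append P T
        have : u ≠ [] := by
          intro h0
          exact hlen (by rw [show pvPassA P T = T ++ u from hu, h0, List.append_nil])
        have h1 : 1 ≤ u.length := by
          cases u with
          | nil => exact absurd rfl this
          | cons a u => simp
        have : (pvPassA P T).length = T.length + u.length := by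
          show (P.foldl pvStepA T).length = _
          rw [hu]; simp
        omega

-- a pass that changes nothing has every single step change nothing
theorem foldl_stepA_fixed (l : List (String × List String)) (T : List String)
    (h : l.foldl pvStepA T = T) : ∀ r ∈ l, pvStepA T r = T := by
  induction l generalizing T with
  | nil => intro r hr; cases hr
  | cons r0 l ih =>
    intro r hr
    obtain ⟨u, hu⟩ := pvStepA_append T r0
    obtain ⟨v, hv⟩ := foldl_stepA_append l (pvStepA T r0)
    have hTuv : T = T ++ (u ++ v) := by
      conv_lhs => rw [← h]
      simp only [List.foldl_cons]
      rw [hv, hu, List.append_assoc]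
    have huv : u ++ v = [] := by
      have h0 := hTuv
      rwa [List.self_eq_append_right] at h0
    have hu0 : u = [] ∧ v = [] := List.append_eq_nil_iff.1 huv
    have hstep : pvStepA T r0 = T := by rw [hu, hu0.1, List.append_nil]
    rcases hr with _ | hr
    · exact hstep
    · apply ih T _ r ‹r ∈ l›
      calc l.foldl pvStepA T = l.foldl pvStepA (pvStepA T r0) := by rw [hstep]
        _ = T := by simpa using h

theorem pvPassA_closed (P : List (String × List String)) (T : List String)
    (h : pvPassA P T = T) :
    ∀ r ∈ P, (∀ s ∈ r.2, isNT s = true → s ∈ T) → r.1 ∈ T := by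
  intro r hr hsat
  have hstep := foldl_stepA_fixed P T h r hr
  unfold pvStepA at hstep
  split_ifs at hstep with h1 h2
  · exact List.contains_iff_mem.1 h1
  · exfalso
    obtain ⟨s, hs, hb⟩ := List.any_eq_true.1 h2
    rw [Bool.and_eq_true, Bool.not_eq_eq_eq_not, Bool.not_true] at hb
    have h3 := List.contains_iff_mem.2 (hsat s hs hb.1)
    rw [hb.2] at h3
    exact Bool.false_ne_true h3
  · exfalso
    have := congrArg List.length hstep
    simp at this

theorem memA (P : List (String × List String)) (x : String) :
    x ∈ pvLoopA P (P.length + 1) [] ↔ PvTerm P x := by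
  have hstable : pvPassA P (pvLoopA P (P.length + 1) []) = pvLoopA P (P.length + 1) [] :=
    pvLoopA_stable P (P.length + 1) [] ⟨List.nodup_nil, by simp⟩ (by simp)
  constructor
  · intro hx
    revert x hx
    -- soundness along the loop
    suffices h : ∀ (f : Nat) (T : List String), (∀ y ∈ T, PvTerm P y) →
        ∀ x ∈ pvLoopA P f T, PvTerm P x by
      intro x hx; exact h (P.length + 1) [] (by simp) x hx
    intro f
    induction f with
    | zero => intro T hT x hx; exact hT x hx
    | succ f ih =>
      intro T hT x hx
      rw [pvLoopA] at hx
      split_ifs at hx with hlen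
      · exact foldl_stepA_sound P P T (fun r h => h) hT x hx
      · exact ih (pvPassA P T) (foldl_stepA_sound P P T (fun r h => h) hT) x hx
  · intro hx
    induction hx with
    | intro lhs rhs hmem hsub ih =>
      exact pvPassA_closed P _ hstable (lhs, rhs) hmem ih


-- ---------- B-side ----------

-- proof-side names for the two folded lambdas of port B (definitionally the same)
def pvIdxF (d : PySem.Dict String (List (String × List String)))
    (r : String × List String) : PySem.Dict String (List (String × List String)) :=
  r.2.foldl (fun d s => if isNT s then d.insert s (d.getD s [] ++ [r]) else d) d

theorem pvIndexB_eq (P : List (String × List String)) :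
    pvIndexB P = P.foldl pvIdxF PySem.Dict.empty := rfl

def pvInitF (tq : PySem.Set String × List String) (r : String × List String) :
    PySem.Set String × List String :=
  if !(PySem.Set.contains tq.1 r.1) && !(r.2.any isNT)
  then (PySem.Set.add tq.1 r.1, r.1 :: tq.2) else tq

theorem pvInitB_eq (P : List (String × List String)) :
    pvInitB P = P.foldl pvInitF (PySem.Set.empty, []) := rfl

-- the index: membership facts
theorem pvIdx_inner_mono (r : String × List String) (rhs : List String)
    (d : PySem.Dict String (List (String × List String))) (s : String)
    (x : String × List String) (h : x ∈ d.getD s []) :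
    x ∈ ((rhs.foldl (fun d s' => if isNT s' then d.insert s' (d.getD s' [] ++ [r]) else d) d).getD s []) := by
  induction rhs generalizing d with
  | nil => exact h
  | cons s0 rhs ih =>
    simp only [List.foldl_cons]
    apply ih
    split_ifs with hnt
    · rw [PySem.Dict.getD_insert]
      split_ifs with he
      · subst he; exact List.mem_append_left _ h
      · exact h
    · exact h

theorem pvIdx_inner_self (r : String × List String) (rhs : List String)
    (d : PySem.Dict String (List (String × List String))) (s : String)
    (hs : s ∈ rhs) (hnt : isNT s = true) :
    r ∈ ((rhs.foldl (fun d s' => if isNT s' then d.insert s' (d.getD s' [] ++ [r]) else d) d).getD s []) := by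
  induction rhs generalizing d with
  | nil => cases hs
  | cons s0 rhs ih =>
    simp only [List.foldl_cons]
    rcases List.mem_cons.1 hs with he | hs'
    · subst he
      apply pvIdx_inner_mono
      rw [if_pos hnt, PySem.Dict.getD_insert, if_pos rfl]
      exact List.mem_append_right _ (List.mem_singleton.2 rfl)
    · exact ih _ hs'

theorem pvIdx_inner_sub (r : String × List String) (rhs : List String)
    (d : PySem.Dict String (List (String × List String))) (s : String)
    (x : String × List String)
    (h : x ∈ ((rhs.foldl (fun d s' => if isNT s' then d.insert s' (d.getD s' [] ++ [r]) else d) d).getD s [])) :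
    x ∈ d.getD s [] ∨ x = r := by
  induction rhs generalizing d with
  | nil => exact Or.inl h
  | cons s0 rhs ih =>
    simp only [List.foldl_cons] at h
    rcases ih _ h with h1 | h1
    · revert h1
      split_ifs with hnt
      · rw [PySem.Dict.getD_insert]
        split_ifs with he
        · intro h1
          rw [he]
          rcases List.mem_append.1 h1 with h2 | h2
          · exact Or.inl h2
          · exact Or.inr (List.mem_singleton.1 h2)
        · exact Or.inl
      · exact Or.inl
    · exact Or.inr h1

theorem pvIdx_outer_mono (l : List (String × List String))
    (d : PySem.Dict String (List (String × List String))) (s : String)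
    (x : String × List String) (h : x ∈ d.getD s []) :
    x ∈ ((l.foldl pvIdxF d).getD s []) := by
  induction l generalizing d with
  | nil => exact h
  | cons r l ih => exact ih _ (pvIdx_inner_mono r r.2 d s x h)

theorem pvIndexB_sub (P : List (String × List String)) (s : String)
    (x : String × List String) (h : x ∈ (pvIndexB P).getD s []) : x ∈ P := by
  rw [pvIndexB_eq] at h
  suffices hgen : ∀ (l : List (String × List String)) d,
      x ∈ ((l.foldl pvIdxF d).getD s []) → x ∈ d.getD s [] ∨ x ∈ l by
    rcases hgen P PySem.Dict.empty h with h1 | h1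
    · rw [PySem.Dict.getD_empty] at h1; cases h1
    · exact h1
  intro l
  induction l with
  | nil => exact fun d h => Or.inl h
  | cons r l ih =>
    intro d h
    rcases ih _ h with h1 | h1
    · rcases pvIdx_inner_sub r r.2 d s x h1 with h2 | h2
      · exact Or.inl h2
      · exact Or.inr (h2 ▸ List.mem_cons_self)
    · exact Or.inr (List.mem_cons_of_mem _ h1)

theorem pvIndexB_self (P : List (String × List String)) (r : String × List String)
    (s : String) (hr : r ∈ P) (hs : s ∈ r.2) (hnt : isNT s = true) :
    r ∈ (pvIndexB P).getD s [] := by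
  rw [pvIndexB_eq]
  suffices hgen : ∀ (l : List (String × List String)) d, r ∈ l →
      r ∈ ((l.foldl pvIdxF d).getD s []) from hgen P _ hr
  intro l
  induction l with
  | nil => intro d h; cases h
  | cons r0 l ih =>
    intro d h
    rcases List.mem_cons.1 h with he | h1
    · subst he
      exact pvIdx_outer_mono l _ s r (pvIdx_inner_self r r.2 d s hs hnt)
    · exact ih _ h1

-- distinct left-hand sides, and the count of those not yet terminating (loop measure)
def pvLhs (P : List (String × List String)) : List String := (P.map Prod.fst).dedup

def pvU (P : List (String × List String)) (t : List String) : Nat :=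
  (pvLhs P).countP (fun x => decide (x ∉ t))

theorem pvU_add (P : List (String × List String)) (t : List String) (a : String)
    (ha : a ∈ P.map Prod.fst) (hat : a ∉ t) : pvU P (t ++ [a]) + 1 = pvU P t := by
  unfold pvU
  have hal : a ∈ pvLhs P := List.mem_dedup.2 ha
  have hnd : (pvLhs P).Nodup := List.nodup_dedup _
  revert hal hnd
  generalize pvLhs P = l
  intro hal hnd
  induction l with
  | nil => cases hal
  | cons b l ih =>
    rw [List.countP_cons, List.countP_cons]
    rcases List.nodup_cons.1 hnd with ⟨hbl, hndl⟩
    by_cases hab : a = b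
    · subst hab
      have h1 : (decide (a ∉ t ++ [a])) = false := by
        simp [List.mem_append]
      have h2 : (decide (a ∉ t)) = true := by simp [hat]
      have h3 : l.countP (fun x => decide (x ∉ t ++ [a])) =
          l.countP (fun x => decide (x ∉ t)) := by
        apply List.countP_congr
        intro x hx
        have hxa : x ≠ a := fun he => hbl (he ▸ hx)
        simp [List.mem_append, hxa]
      rw [h1, h2, h3]
      simp
    · have hal' : a ∈ l := (List.mem_cons.1 hal).resolve_left hab
      have h1 : (decide (b ∉ t ++ [a])) = (decide (b ∉ t)) := by
        simp [List.mem_append, Ne.symm hab]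
      rw [h1]
      have h2 := ih hal' hndl
      omega

-- state invariant of the worklist: queue ⊆ term, queue nodup, term ⊆ lhs's, term sound
def pvGB (P : List (String × List String)) (t q : List String) : Prop :=
  (∀ x ∈ q, x ∈ t) ∧ q.Nodup ∧ (∀ x ∈ t, x ∈ P.map Prod.fst) ∧ (∀ x ∈ t, PvTerm P x)

-- closure relative to the already-popped symbols (= term elements not in the queue)
def pvC (P : List (String × List String)) (t q : List String) : Prop :=
  ∀ r ∈ P, (∀ s ∈ r.2, isNT s = true → s ∈ t ∧ s ∉ q) → r.1 ∈ t

theorem pvStepB_props (P : List (String × List String)) (t q : List String)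
    (r : String × List String) (hr : r ∈ P) (hg : pvGB P t q) :
    pvGB P (pvStepB (t, q) r).1 (pvStepB (t, q) r).2 ∧
    (∀ x ∈ t, x ∈ (pvStepB (t, q) r).1) ∧
    (∀ x, (x ∈ (pvStepB (t, q) r).1 ∧ x ∉ (pvStepB (t, q) r).2) ↔ (x ∈ t ∧ x ∉ q)) ∧
    (pvStepB (t, q) r).2.length + pvU P (pvStepB (t, q) r).1 = q.length + pvU P t := by
  obtain ⟨hq, hnd, hsub, hsound⟩ := hg
  simp only [pvStepB]
  split_ifs with hcond
  · simp only
    rw [Bool.and_eq_true, Bool.not_eq_eq_eq_not, Bool.not_eq_eq_eq_not, Bool.not_true] at hcond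
    obtain ⟨hcf, haf⟩ := hcond
    have hnt : r.1 ∉ t := fun hm => by
      rw [(PySem.Set.contains_iff _ _).2 hm] at hcf; cases hcf
    rw [PySem.Set.add_of_not_mem hnt]
    have hnq : r.1 ∉ q := fun hm => hnt (hq _ hm)
    refine ⟨⟨?_, ?_, ?_, ?_⟩, ?_, ?_, ?_⟩
    · intro x hx
      rcases List.mem_cons.1 hx with he | hx'
      · exact he ▸ List.mem_append_right _ (List.mem_singleton.2 rfl)
      · exact List.mem_append_left _ (hq x hx')
    · exact List.nodup_cons.2 ⟨hnq, hnd⟩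
    · intro x hx
      rcases List.mem_append.1 hx with h | h
      · exact hsub x h
      · exact (List.mem_singleton.1 h) ▸ List.mem_map_of_mem hr
    · intro x hx
      rcases List.mem_append.1 hx with h | h
      · exact hsound x h
      · rw [List.mem_singleton.1 h]
        refine PvTerm.intro r.1 r.2 hr ?_
        intro s hs hsnt
        apply hsound
        have hc : ¬(isNT s && !(PySem.Set.contains t s)) = true := fun hc =>
          (by rw [List.any_eq_true.2 ⟨s, hs, hc⟩] at haf; cases haf)
        simp only [hsnt, Bool.true_and, Bool.not_eq_eq_eq_not, Bool.not_true] at hc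
        exact (PySem.Set.contains_iff _ _).1 (by simpa using hc)
    · exact fun x hx => List.mem_append_left _ hx
    · intro x
      constructor
      · rintro ⟨hx1, hx2⟩
        rcases List.mem_append.1 hx1 with h | h
        · exact ⟨h, fun hm => hx2 (List.mem_cons_of_mem _ hm)⟩
        · exact absurd (List.mem_cons_self) (by rw [List.mem_singleton.1 h] at hx2; exact hx2)
      · rintro ⟨hx1, hx2⟩
        refine ⟨List.mem_append_left _ hx1, ?_⟩
        intro hm
        rcases List.mem_cons.1 hm with he | hm'
        · exact hnt (he ▸ hx1)
        · exact hx2 hm'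
    · have := pvU_add P t r.1 (List.mem_map_of_mem hr) hnt
      simp only [List.length_cons]
      omega
  · exact ⟨⟨hq, hnd, hsub, hsound⟩, fun x hx => hx, fun x => Iff.rfl, rfl⟩

theorem pvFoldB_props (P : List (String × List String))
    (rs : List (String × List String)) :
    ∀ (t q : List String), (∀ r ∈ rs, r ∈ P) → pvGB P t q →
    pvGB P (rs.foldl pvStepB (t, q)).1 (rs.foldl pvStepB (t, q)).2 ∧
    (∀ x ∈ t, x ∈ (rs.foldl pvStepB (t, q)).1) ∧
    (∀ x, (x ∈ (rs.foldl pvStepB (t, q)).1 ∧ x ∉ (rs.foldl pvStepB (t, q)).2) ↔ (x ∈ t ∧ x ∉ q)) ∧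
    (rs.foldl pvStepB (t, q)).2.length + pvU P (rs.foldl pvStepB (t, q)).1 = q.length + pvU P t := by
  induction rs with
  | nil => exact fun t q _ hg => ⟨hg, fun x hx => hx, fun x => Iff.rfl, rfl⟩
  | cons r rs ih =>
    intro t q hrs hg
    have hstep := pvStepB_props P t q r (hrs r List.mem_cons_self) hg
    simp only [List.foldl_cons]
    rcases hp : pvStepB (t, q) r with ⟨t1, q1⟩
    rw [hp] at hstep
    dsimp only at hstep
    obtain ⟨hg1, hmono1, hpop1, hm1⟩ := hstep
    have := ih t1 q1 (fun r' h => hrs r' (List.mem_cons_of_mem _ h)) hg1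
    obtain ⟨hg2, hmono2, hpop2, hm2⟩ := this
    refine ⟨hg2, fun x hx => hmono2 x (hmono1 x hx), fun x => (hpop2 x).trans (hpop1 x), by omega⟩

theorem pvFoldB_mono (rs : List (String × List String)) :
    ∀ (t q : List String) (x : String), x ∈ t → x ∈ (rs.foldl pvStepB (t, q)).1 := by
  induction rs with
  | nil => exact fun t q x hx => hx
  | cons r rs ih =>
    intro t q x hx
    simp only [List.foldl_cons]
    rcases hp : pvStepB (t, q) r with ⟨t1, q1⟩
    have hx1 : x ∈ t1 := by
      have hxx : x ∈ (pvStepB (t, q) r).1 := by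
        simp only [pvStepB]
        split_ifs
        · exact (PySem.Set.mem_add _ _ _).2 (Or.inl hx)
        · exact hx
      rwa [hp] at hxx
    exact ih t1 q1 x hx1

theorem pvFoldB_hits (rs : List (String × List String)) :
    ∀ (t q : List String) (r : String × List String), r ∈ rs →
    (∀ s ∈ r.2, isNT s = true → s ∈ t) → r.1 ∈ (rs.foldl pvStepB (t, q)).1 := by
  induction rs with
  | nil => intro t q r hr; cases hr
  | cons r0 rs ih =>
    intro t q r hr hsat
    simp only [List.foldl_cons]
    rcases List.mem_cons.1 hr with he | hr'
    · subst he
      by_cases hc : PySem.Set.contains t r.1 = true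
      · have hmm : r.1 ∈ (pvStepB (t, q) r).1 := by
          simp only [pvStepB]
          split_ifs
          · exact (PySem.Set.mem_add _ _ _).2 (Or.inl ((PySem.Set.contains_iff _ _).1 hc))
          · exact (PySem.Set.contains_iff _ _).1 hc
        rcases hp : pvStepB (t, q) r with ⟨t1, q1⟩
        rw [hp] at hmm
        exact pvFoldB_mono rs t1 q1 r.1 hmm
      · have haf : (r.2.any fun s => isNT s && !(PySem.Set.contains t s)) = false := by
          rw [List.any_eq_false]
          intro s hs
          simp only [Bool.and_eq_true, Bool.not_eq_eq_eq_not, Bool.not_true, not_and]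
          intro hsnt
          rw [(PySem.Set.contains_iff _ _).2 (hsat s hs hsnt)]
          simp
        have hmm : r.1 ∈ (pvStepB (t, q) r).1 := by
          simp only [pvStepB]
          rw [if_pos (by
            simp only [Bool.and_eq_true, Bool.not_eq_eq_eq_not, Bool.not_true]
            exact ⟨Bool.eq_false_iff.2 hc, haf⟩)]
          exact (PySem.Set.mem_add _ _ _).2 (Or.inr rfl)
        rcases hp : pvStepB (t, q) r with ⟨t1, q1⟩
        rw [hp] at hmm
        exact pvFoldB_mono rs t1 q1 r.1 hmm
    · apply ih _ _ r hr'
      intro s hs hsnt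
      have hst : s ∈ t := hsat s hs hsnt
      have hss : s ∈ (List.foldl pvStepB (t, q) [r0]).1 := by
        simp only [List.foldl_cons, List.foldl_nil, pvStepB]
        split_ifs
        · exact (PySem.Set.mem_add _ _ _).2 (Or.inl hst)
        · exact hst
      simpa using hss

-- processing one popped symbol: the invariants carry over and the measure drops by 1
theorem pvPopB (P : List (String × List String)) (sym : String) (rest t : List String)
    (hg : pvGB P t (sym :: rest)) (hc : pvC P t (sym :: rest)) :
    pvGB P (((pvIndexB P).getD sym []).foldl pvStepB (t, rest)).1
          (((pvIndexB P).getD sym []).foldl pvStepB (t, rest)).2 ∧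
    pvC P (((pvIndexB P).getD sym []).foldl pvStepB (t, rest)).1
          (((pvIndexB P).getD sym []).foldl pvStepB (t, rest)).2 ∧
    (((pvIndexB P).getD sym []).foldl pvStepB (t, rest)).2.length +
      pvU P (((pvIndexB P).getD sym []).foldl pvStepB (t, rest)).1 + 1 =
      (sym :: rest).length + pvU P t := by
  obtain ⟨hq, hnd, hsub, hsound⟩ := hg
  have hsymt : sym ∈ t := hq sym List.mem_cons_self
  have hsymrest : sym ∉ rest := (List.nodup_cons.1 hnd).1
  have hg' : pvGB P t rest :=
    ⟨fun x hx => hq x (List.mem_cons_of_mem _ hx), (List.nodup_cons.1 hnd).2, hsub, hsound⟩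
  have hrs : ∀ r ∈ (pvIndexB P).getD sym [], r ∈ P := fun r h => pvIndexB_sub P sym r h
  obtain ⟨hg2, hmono, hpop, hm⟩ := pvFoldB_props P ((pvIndexB P).getD sym []) t rest hrs hg'
  refine ⟨hg2, ?_, by simp only [List.length_cons]; omega⟩
  intro r hrP hsat
  have hsat' : ∀ s ∈ r.2, isNT s = true → s ∈ t ∧ s ∉ rest := by
    intro s hs hsnt
    exact (hpop s).1 (hsat s hs hsnt)
  have hsatt : ∀ s ∈ r.2, isNT s = true → s ∈ t := fun s hs hsnt => (hsat' s hs hsnt).1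
  by_cases hocc : ∃ s ∈ r.2, isNT s = true ∧ s = sym
  · obtain ⟨s, hs, hsnt, hse⟩ := hocc
    subst hse
    exact pvFoldB_hits _ t rest r (pvIndexB_self P r s hrP hs hsnt) hsatt
  · apply pvFoldB_mono
    apply hc r hrP
    intro s hs hsnt
    refine ⟨(hsat' s hs hsnt).1, ?_⟩
    intro hm'
    rcases List.mem_cons.1 hm' with he | hm''
    · exact hocc ⟨s, hs, hsnt, he⟩
    · exact (hsat' s hs hsnt).2 hm''

-- running the whole worklist: the result is sound and closed
theorem pvLoopB_run (P : List (String × List String)) :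
    ∀ (f : Nat) (t q : List String), pvGB P t q → pvC P t q →
      q.length + pvU P t ≤ f →
      (∀ x ∈ pvLoopB (pvIndexB P) f (t, q), PvTerm P x) ∧
      (∀ r ∈ P, (∀ s ∈ r.2, isNT s = true → s ∈ pvLoopB (pvIndexB P) f (t, q)) →
        r.1 ∈ pvLoopB (pvIndexB P) f (t, q)) := by
  intro f
  induction f with
  | zero =>
    intro t q hg hc hb
    have hq0 : q = [] := List.eq_nil_of_length_eq_zero (by omega)
    subst hq0
    refine ⟨fun x hx => hg.2.2.2 x hx, ?_⟩
    intro r hrP hsat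
    exact hc r hrP (fun s hs hsnt => ⟨hsat s hs hsnt, List.not_mem_nil⟩)
  | succ f ih =>
    intro t q hg hc hb
    cases q with
    | nil =>
      show _ ∧ _
      rw [pvLoopB]
      refine ⟨fun x hx => hg.2.2.2 x hx, ?_⟩
      intro r hrP hsat
      exact hc r hrP (fun s hs hsnt => ⟨hsat s hs hsnt, List.not_mem_nil⟩)
    | cons sym rest =>
      obtain ⟨hg2, hc2, hm⟩ := pvPopB P sym rest t hg hc
      have hEq : pvLoopB (pvIndexB P) (f+1) (t, sym :: rest) =
          pvLoopB (pvIndexB P) f (((pvIndexB P).getD sym []).foldl pvStepB (t, rest)) := rfl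
      rw [hEq]
      rcases hp : ((pvIndexB P).getD sym []).foldl pvStepB (t, rest) with ⟨t1, q1⟩
      rw [hp] at hg2 hc2 hm
      dsimp only at hg2 hc2 hm
      simp only [List.length_cons] at hm hb
      exact ih t1 q1 hg2 hc2 (by omega)

-- the seed pass establishes the invariants, with every term element still queued
theorem pvInitB_props (P : List (String × List String)) :
    pvGB P (pvInitB P).1 (pvInitB P).2 ∧ pvC P (pvInitB P).1 (pvInitB P).2 ∧
    (pvInitB P).2.length + pvU P (pvInitB P).1 ≤ P.length + 1 := by
  rw [pvInitB_eq, show (PySem.Set.empty : PySem.Set String) = [] from rfl]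
  suffices hgen : ∀ (l : List (String × List String)) (t q : List String),
      (∀ r ∈ l, r ∈ P) → pvGB P t q → (∀ x ∈ t, x ∈ q) →
      pvGB P (l.foldl pvInitF (t, q)).1 (l.foldl pvInitF (t, q)).2 ∧
      (∀ x ∈ (l.foldl pvInitF (t, q)).1, x ∈ (l.foldl pvInitF (t, q)).2) ∧
      (∀ x ∈ t, x ∈ (l.foldl pvInitF (t, q)).1) ∧
      (∀ r ∈ l, (r.2.any isNT) = false → r.1 ∈ (l.foldl pvInitF (t, q)).1) ∧
      (l.foldl pvInitF (t, q)).2.length + pvU P (l.foldl pvInitF (t, q)).1 =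
        q.length + pvU P t by
    obtain ⟨hg, hback, _, hproc, hm⟩ :=
      hgen P [] [] (fun r h => h) ⟨fun x hx => absurd hx List.not_mem_nil, List.nodup_nil,
        fun x hx => absurd hx List.not_mem_nil, fun x hx => absurd hx List.not_mem_nil⟩
        (fun x hx => absurd hx List.not_mem_nil)
    refine ⟨hg, ?_, ?_⟩
    · intro r hrP hsat
      have hno : (r.2.any isNT) = false := by
        rw [List.any_eq_false]
        intro s hs hsnt
        exact (hsat s hs hsnt).2 (hback s (hsat s hs hsnt).1)
      exact hproc r hrP hno
    · have h1 : pvU P ([] : List String) ≤ P.length := by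
        calc pvU P [] ≤ (pvLhs P).length := List.countP_le_length
          _ ≤ (P.map Prod.fst).length := List.Sublist.length_le (List.dedup_sublist _)
          _ = P.length := List.length_map _
      simp only [List.length_nil] at hm
      omega
  intro l
  induction l with
  | nil =>
    intro t q _ hg hback
    exact ⟨hg, hback, fun x hx => hx, fun r h => absurd h List.not_mem_nil, rfl⟩
  | cons r l ih =>
    intro t q hl hg hback
    obtain ⟨hq, hnd, hsub, hsound⟩ := hg
    simp only [List.foldl_cons]
    have hstep : pvGB P (pvInitF (t, q) r).1 (pvInitF (t, q) r).2 ∧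
        (∀ x ∈ (pvInitF (t, q) r).1, x ∈ (pvInitF (t, q) r).2) ∧
        (∀ x ∈ t, x ∈ (pvInitF (t, q) r).1) ∧
        ((r.2.any isNT) = false → r.1 ∈ (pvInitF (t, q) r).1) ∧
        (pvInitF (t, q) r).2.length + pvU P (pvInitF (t, q) r).1 = q.length + pvU P t := by
      simp only [pvInitF]
      split_ifs with hcond
      · simp only
        rw [Bool.and_eq_true, Bool.not_eq_eq_eq_not, Bool.not_eq_eq_eq_not, Bool.not_true] at hcond
        obtain ⟨hcf, hafz⟩ := hcond
        have hnt : r.1 ∉ t := fun hm => by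
          rw [(PySem.Set.contains_iff _ _).2 hm] at hcf; cases hcf
        rw [PySem.Set.add_of_not_mem hnt]
        have hnq : r.1 ∉ q := fun hm => hnt (hq _ hm)
        refine ⟨⟨?_, List.nodup_cons.2 ⟨hnq, hnd⟩, ?_, ?_⟩, ?_, ?_, ?_, ?_⟩
        · intro x hx
          rcases List.mem_cons.1 hx with he | hx'
          · exact he ▸ List.mem_append_right _ (List.mem_singleton.2 rfl)
          · exact List.mem_append_left _ (hq x hx')
        · intro x hx
          rcases List.mem_append.1 hx with h | h
          · exact hsub x h
          · exact (List.mem_singleton.1 h) ▸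
              List.mem_map_of_mem (hl r List.mem_cons_self)
        · intro x hx
          rcases List.mem_append.1 hx with h | h
          · exact hsound x h
          · rw [List.mem_singleton.1 h]
            refine PvTerm.intro r.1 r.2 (hl r List.mem_cons_self) ?_
            intro s hs hsnt
            exfalso
            rw [List.any_eq_false] at hafz
            exact hafz s hs hsnt
        · intro x hx
          rcases List.mem_append.1 hx with h | h
          · exact List.mem_cons_of_mem _ (hback x h)
          · exact (List.mem_singleton.1 h) ▸ List.mem_cons_self
        · exact fun x hx => List.mem_append_left _ hx
        · intro _
          exact List.mem_append_right _ (List.mem_singleton.2 rfl)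
        · have := pvU_add P t r.1 (List.mem_map_of_mem (hl r List.mem_cons_self)) hnt
          simp only [List.length_cons]
          omega
      · refine ⟨⟨hq, hnd, hsub, hsound⟩, hback, fun x hx => hx, ?_, rfl⟩
        intro hno
        rw [Bool.and_eq_true, Bool.not_eq_eq_eq_not, Bool.not_eq_eq_eq_not, Bool.not_true,
          not_and] at hcond
        by_cases hcf : PySem.Set.contains t r.1 = false
        · exact absurd hno (by simpa using hcond hcf)
        · exact (PySem.Set.contains_iff _ _).1 (by
            rw [Bool.eq_false_iff] at hcf
            simpa using hcf)
    rcases hp : pvInitF (t, q) r with ⟨t1, q1⟩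
    rw [hp] at hstep
    dsimp only at hstep
    obtain ⟨hg1, hback1, hmono1, hproc1, hm1⟩ := hstep
    obtain ⟨hg2, hback2, hmono2, hproc2, hm2⟩ :=
      ih t1 q1 (fun r' h => hl r' (List.mem_cons_of_mem _ h)) hg1 hback1
    refine ⟨hg2, hback2, fun x hx => hmono2 x (hmono1 x hx), ?_, by omega⟩
    intro r' hr' hno
    rcases List.mem_cons.1 hr' with he | hr''
    · subst he
      exact hmono2 _ (hproc1 hno)
    · exact hproc2 r' hr'' hno

theorem memB (P : List (String × List String)) (x : String) :
    x ∈ pvLoopB (pvIndexB P) (P.length + 1) (pvInitB P) ↔ PvTerm P x := by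
  obtain ⟨hg, hc, hm⟩ := pvInitB_props P
  rcases hp : pvInitB P with ⟨t0, q0⟩
  rw [hp] at hg hc hm
  obtain ⟨hsound, hclosed⟩ := pvLoopB_run P (P.length + 1) t0 q0 hg hc hm
  constructor
  · exact hsound x
  · intro hx
    induction hx with
    | intro lhs rhs hmem hsub ih => exact hclosed (lhs, rhs) hmem ih

theorem terminating_rule_main (P : List (String × List String)) :
    terminating_rule P = terminating_rule_alt P := by
  unfold terminating_rule terminating_rule_alt
  apply List.filter_congr
  intro r _
  have hmem : ∀ y : String, (pvLoopA P (P.length + 1) []).contains y =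
      PySem.Set.contains (pvLoopB (pvIndexB P) (P.length + 1) (pvInitB P)) y := by
    intro y
    have hiff : y ∈ pvLoopA P (P.length + 1) [] ↔
        y ∈ pvLoopB (pvIndexB P) (P.length + 1) (pvInitB P) :=
      (memA P y).trans (memB P y).symm
    have hA : (pvLoopA P (P.length + 1) []).contains y = true ↔
        y ∈ pvLoopA P (P.length + 1) [] := List.contains_iff_mem
    have hB : PySem.Set.contains (pvLoopB (pvIndexB P) (P.length + 1) (pvInitB P)) y = true ↔
        y ∈ pvLoopB (pvIndexB P) (P.length + 1) (pvInitB P) := PySem.Set.contains_iff _ _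
    exact Bool.coe_iff_coe.1 (hA.trans (hiff.trans hB.symm))
  unfold pvCheckA pvCheckB
  rw [← hmem r.1]
  have h2 : (fun s => isNT s && !(PySem.Set.contains (pvLoopB (pvIndexB P) (P.length + 1) (pvInitB P)) s)) =
      (fun s => isNT s && !((pvLoopA P (P.length + 1) []).contains s)) :=
    funext fun s => by rw [← hmem s]
  rw [h2]

-- ===== VERDICT (by name: the statement is the Claim_ definition above) =====
theorem terminating_rule_spec : Claim_equal_terminating_rule := by
  intro P _ _
  show _ = _
  exact terminating_rule_main P
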